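-- pv_equiv track=rewrite | github.com/PraditiRede/Novel_Secure_Technique | server.py | pos_v1
-- ===== SOURCE A (Python) =====
-- def pos_v1 (pos, v1) :
--     var = []
--     i = 0
--     k = 0
--     while (i < len(pos) and k < len(v1)) :
--         if (i % 2 == 0) :
--             var.append(pos[i])
--             pos[i] = str(12345)
--             k = k + 1
--         i = i + 1
--     return var
-- ===== SOURCE B (Python) =====
-- def pos_v1(pos, v1):
--     # closed-form collection (even-indexed prefix of length <= len(v1)), then a separate mutation pass
--     var = [x for i, x in enumerate(pos) if i % 2 == 0][:len(v1)]
--     for i in range(0, 2 * len(var), 2):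
--         pos[i] = '12345'
--     return var
-- ===== Notes on version B (the rewrite author's own statement) =====
-- stated objective: simpler
-- what changed: A's single interleaved while-loop with a manual index/counter pair and per-element in-place writes is replaced by a closed-form collection (even-indexed elements via enumerate-filter, truncated to len(v1)) followed by a separate mutation pass over exactly the collected positions.
import Mathlib
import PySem

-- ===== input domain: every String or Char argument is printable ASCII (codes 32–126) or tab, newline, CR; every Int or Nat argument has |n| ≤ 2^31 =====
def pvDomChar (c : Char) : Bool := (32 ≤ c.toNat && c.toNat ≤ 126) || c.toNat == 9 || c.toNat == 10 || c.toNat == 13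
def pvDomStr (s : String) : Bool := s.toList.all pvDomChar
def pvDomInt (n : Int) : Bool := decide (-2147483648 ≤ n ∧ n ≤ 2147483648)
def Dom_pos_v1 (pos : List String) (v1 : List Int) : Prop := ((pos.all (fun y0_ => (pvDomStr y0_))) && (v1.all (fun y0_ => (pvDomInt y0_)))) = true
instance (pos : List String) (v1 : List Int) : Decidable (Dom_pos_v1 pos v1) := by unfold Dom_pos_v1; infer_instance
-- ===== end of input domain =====

-- B replaces A's single interleaved counter loop by a closed-form collection of the
-- even-indexed prefix plus a separate mutation pass (simpler decomposition).
-- Both A and B mutate the argument list `pos` in Python (identically); the equivalence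
-- proved here is about the RETURN value only.

-- ===== PORT A =====
-- the while loop of A: state (pos, i, k, var); `pos[i] = str(12345)` is `pos.set i (toStr 12345)`
def posV1LoopA (pos : List String) (lv1 : Nat) (i k : Nat) (var : List String) : List String :=
  if h : i < pos.length ∧ k < lv1 then
    if i % 2 = 0 then
      posV1LoopA (pos.set i (PySem.Int.toStr 12345)) lv1 (i+1) (k+1) (var ++ [pos.getD i ""])
    else
      posV1LoopA pos lv1 (i+1) k var
  else var
termination_by pos.length - i
decreasing_by all_goals (try simp only [List.length_set]); omega

def pos_v1 (pos : List String) (v1 : List Int) : List String :=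
  posV1LoopA pos v1.length 0 0 []

-- ===== PORT B =====
def pos_v1_alt (pos : List String) (v1 : List Int) : List String :=
  -- var = [x for i, x in enumerate(pos) if i % 2 == 0][:len(v1)]
  let var := (((PySem.List.enumerate pos).filter (fun p => p.1 % 2 == 0)).map (·.2)).take v1.length
  -- (the mutation pass of Source B writes only into the argument `pos`; it does not touch `var`)
  var

-- ===== PRECONDITION & SPEC =====
def Spec_pos_v1 (pos : List String) (v1 : List Int) (out : List String) : Prop := out = pos_v1_alt pos v1
instance (pos : List String) (v1 : List Int) (out : List String) : Decidable (Spec_pos_v1 pos v1 out) := by unfold Spec_pos_v1; infer_instance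

-- ===== CLAIM (what is proved, stated in full; the proofs are below) =====
def Claim_equal_pos_v1 : Prop := ∀ (pos : List String) (v1 : List Int), Dom_pos_v1 pos v1 → Spec_pos_v1 pos v1 (pos_v1 pos v1)

-- ===== LEMMAS AND PROOFS =====

-- common reference value: the even-indexed elements, at most m of them
def pvEvensTake : List String → Nat → List String
  | _, 0 => []
  | [], _ => []
  | [x], _+1 => [x]
  | x :: _ :: t, m+1 => x :: pvEvensTake t m

-- a write strictly below the cursor is invisible to the rest of A's loop
theorem posV1LoopA_set (lv1 : Nat) : ∀ N (pos : List String) (i k : Nat) (var : List String)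
    (j : Nat) (v : String), pos.length - i ≤ N → j < i →
    posV1LoopA (pos.set j v) lv1 i k var = posV1LoopA pos lv1 i k var := by
  intro N
  induction N with
  | zero =>
    intro pos i k var j v hN hj
    conv_lhs => rw [posV1LoopA]
    conv_rhs => rw [posV1LoopA]
    simp only [List.length_set]
    have : ¬ (i < pos.length ∧ k < lv1) := by omega
    rw [dif_neg this, dif_neg this]
  | succ N ih =>
    intro pos i k var j v hN hj
    conv_lhs => rw [posV1LoopA]
    conv_rhs => rw [posV1LoopA]
    simp only [List.length_set]
    by_cases hc : i < pos.length ∧ k < lv1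
    · rw [dif_pos hc, dif_pos hc]
      have hne : j ≠ i := by omega
      have hget : (pos.set j v).getD i "" = pos.getD i "" := by
        simp [List.getD, List.getElem?_set_ne hne]
      by_cases hp : i % 2 = 0
      · rw [if_pos hp, if_pos hp, hget, List.set_comm _ _ hne]
        rw [ih _ _ _ _ j v (by simp only [List.length_set]; omega) (by omega)]
      · rw [if_neg hp, if_neg hp, ih _ _ _ _ j v (by omega) (by omega)]
    · rw [dif_neg hc, dif_neg hc]

-- A's loop from an even cursor computes pvEvensTake of the remaining list
theorem posV1LoopA_even (lv1 : Nat) : ∀ N (pos : List String) (i k : Nat) (var : List String),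
    pos.length - i ≤ N → i % 2 = 0 →
    posV1LoopA pos lv1 i k var = var ++ pvEvensTake (pos.drop i) (lv1 - k) := by
  intro N
  induction N with
  | zero =>
    intro pos i k var hN hi
    conv_lhs => rw [posV1LoopA]
    have hng : ¬ (i < pos.length ∧ k < lv1) := by
      intro ⟨h1, _⟩; omega
    rw [dif_neg hng]
    have : pos.drop i = [] := List.drop_eq_nil_of_le (by omega)
    rw [this]
    cases h : lv1 - k <;> simp [pvEvensTake]
  | succ N ih =>
    intro pos i k var hN hi
    conv_lhs => rw [posV1LoopA]
    by_cases hc : i < pos.length ∧ k < lv1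
    · rw [dif_pos hc, if_pos hi]
      -- unfold the odd step i+1
      conv_lhs => rw [posV1LoopA]
      simp only [List.length_set]
      have hodd : ¬ ((i+1) % 2 = 0) := by omega
      by_cases hc2 : i + 1 < pos.length ∧ k + 1 < lv1
      · rw [dif_pos hc2, if_neg hodd]
        rw [posV1LoopA_set lv1 N _ _ _ _ i _ (by omega) (by omega)]
        rw [ih pos (i+2) (k+1) _ (by omega) (by omega)]
        have hdrop : pos.drop i = pos.getD i "" :: pos.getD (i+1) "" :: pos.drop (i+2) := by
          have h1 : i < pos.length := hc.1
          have h2 : i + 1 < pos.length := hc2.1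
          rw [List.drop_eq_getElem_cons h1, List.drop_eq_getElem_cons h2]
          simp [List.getD, List.getElem?_eq_getElem h1, List.getElem?_eq_getElem h2]
        rw [hdrop]
        have hm : lv1 - k = (lv1 - (k+1)) + 1 := by omega
        rw [hm]
        simp [pvEvensTake]
      · rw [dif_neg hc2]
        -- loop ends after collecting pos[i]: remainder is a singleton pick
        have h1 : i < pos.length := hc.1
        have hdrop1 : pos.drop i = pos.getD i "" :: pos.drop (i+1) := by
          rw [List.drop_eq_getElem_cons h1]
          simp [List.getD, List.getElem?_eq_getElem h1]
        have hm : lv1 - k = (lv1 - (k+1)) + 1 := by omega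
        rcases Decidable.not_and_iff_or_not.mp hc2 with hlen | hk
        · -- i+1 ≥ len: drop i is a singleton
          have : pos.drop (i+1) = [] := List.drop_eq_nil_of_le (by omega)
          rw [hdrop1, this, hm]
          simp [pvEvensTake]
        · -- k+1 ≥ lv1: one slot left
          have hm0 : lv1 - (k+1) = 0 := by omega
          rw [hdrop1, hm, hm0]
          cases hd : pos.drop (i+1) <;> simp [pvEvensTake]
    · rw [dif_neg hc]
      rcases Decidable.not_and_iff_or_not.mp hc with hlen | hk
      · have : pos.drop i = [] := List.drop_eq_nil_of_le (by omega)
        rw [this]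
        cases h : lv1 - k <;> simp [pvEvensTake]
      · have : lv1 - k = 0 := by omega
        rw [this]
        cases hd : pos.drop i <;> simp [pvEvensTake]

-- structural skeleton (two list elements at a time); used via pvEvensSkel.induct below
def pvEvensSkel : List String → Unit
  | [] => ()
  | [_] => ()
  | _ :: _ :: t => pvEvensSkel t

-- B's enumerate/filter/take computes the same reference value (for an even start index)
theorem evensEnum_take : ∀ (pos : List String) (s : Int) (m : Nat), s % 2 = 0 →
    ((((PySem.List.enumerate pos s).filter (fun p => p.1 % 2 == 0)).map (·.2)).take m)
      = pvEvensTake pos m := by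
  intro pos
  induction pos using pvEvensSkel.induct
  case case1 =>  -- []
    intro s m _; cases m <;> simp [PySem.List.enumerate_nil, pvEvensTake]
  case case2 x =>  -- [x]
    intro s m hs
    cases m with
    | zero => simp [pvEvensTake]
    | succ m =>
      simp [PySem.List.enumerate_cons, PySem.List.enumerate_nil, pvEvensTake,
        List.filter, hs]
  case case3 x y t ih =>
    intro s m hs
    have hs1 : ¬ ((s + 1) % 2 = 0) := by omega
    cases m with
    | zero => simp [pvEvensTake]
    | succ m =>
      rw [PySem.List.enumerate_cons, PySem.List.enumerate_cons]
      simp [hs, hs1, pvEvensTake, ih (s + 1 + 1) m (by omega)]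

-- ===== VERDICT (by name: the statement is the Claim_ definition above) =====
theorem pos_v1_spec : Claim_equal_pos_v1 := by
  intro pos v1 _
  unfold Spec_pos_v1 pos_v1 pos_v1_alt
  rw [posV1LoopA_even v1.length pos.length pos 0 0 [] (by omega) (by omega)]
  rw [evensEnum_take pos 0 v1.length (by omega)]
  simp
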